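-- pv_equiv track=rewrite | github.com/Hi-Im-Simon/Advent-of-Code | 2020/day-06.py | sum_of_common_counts
-- ===== SOURCE A (Python) =====
-- def sum_of_common_counts(file):
--     ans = 0
--     for group in file:
--         answers = list(group[0])
--         i = 0
--         while i < len(answers):
--             for member in group:
--                 if answers[i] not in member:
--                     answers.remove(answers[i])
--                     i -= 1
--                     break
--             i += 1
--         ans += len(answers)
--     return ans
-- ===== SOURCE B (Python) =====
-- def sum_of_common_counts(file):
--     total = 0
--     for group in file:
--         common = set(group[0])
--         for member in group:
--             common &= set(member)
--         total += sum(1 for c in group[0] if c in common)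
--     return total
-- ===== Notes on version B (the rewrite author's own statement) =====
-- stated objective: alternative
-- what changed: B computes each group's common letters once by intersecting per-member character sets and then counts group[0]'s characters against that set, instead of A's in-place while loop that rescans all members per candidate and removes failures from a mutable list.
-- outside the precondition, e.g. on sum_of_common_counts([[]]): A raises IndexError, B raises IndexError
import Mathlib
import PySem

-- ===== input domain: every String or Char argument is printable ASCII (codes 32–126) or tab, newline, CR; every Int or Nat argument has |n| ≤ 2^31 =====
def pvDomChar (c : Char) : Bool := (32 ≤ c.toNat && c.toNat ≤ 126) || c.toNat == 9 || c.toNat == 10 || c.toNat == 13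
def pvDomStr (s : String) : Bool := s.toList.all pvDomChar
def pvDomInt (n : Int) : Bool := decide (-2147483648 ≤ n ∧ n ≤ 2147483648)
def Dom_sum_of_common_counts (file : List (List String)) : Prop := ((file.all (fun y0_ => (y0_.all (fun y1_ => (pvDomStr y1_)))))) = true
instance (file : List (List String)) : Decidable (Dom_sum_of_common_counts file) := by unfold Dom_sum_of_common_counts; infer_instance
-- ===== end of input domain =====

-- B replaces A's remove-while-rescanning loop by one set-intersection pass plus a counting pass over group[0] (objective: alternative).

-- ===== PORT A =====
-- A's while loop: state = (answers, i); 'answers[i] not in member' is a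
-- single-character substring test, exact as m.toList.contains answers[i];
-- 'remove; i -= 1; break' then 'i += 1' leaves i unchanged with the element removed.
-- termination measure fact for pvLoopA (cited from its decreasing_by)
theorem pvLoopA_dec (answers : List Char) (i : Nat) (h : i < answers.length) :
    ((PySem.List.remove? answers answers[i]).getD answers).length - i < answers.length - i := by
  have hc : answers[i] ∈ answers := List.getElem_mem h
  rw [PySem.List.remove?_eq_some_erase _ _ hc, Option.getD_some]
  have := List.length_erase_of_mem hc
  omega

def pvLoopA (group : List String) (answers : List Char) (i : Nat) : List Char :=
  if h : i < answers.length then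
    if group.any (fun m => !(m.toList.contains answers[i])) then
      pvLoopA group ((PySem.List.remove? answers answers[i]).getD answers) i
    else
      pvLoopA group answers (i + 1)
  else answers
termination_by answers.length - i
decreasing_by
  · exact pvLoopA_dec answers i h
  · exact Nat.sub_lt_sub_left h (Nat.lt_succ_self i)

def sum_of_common_counts (file : List (List String)) : Int :=
  file.foldl (fun ans group =>
    ans + ((pvLoopA group ((PySem.List.pyGet? group 0).getD "").toList 0).length : Int)) 0
    -- group[0]: total via getD "", never reached under Pre_ (groups nonempty)

-- ===== PORT B =====
def sum_of_common_counts_alt (file : List (List String)) : Int :=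
  file.foldl (fun total group =>
    let common := group.foldl
      (fun s m => PySem.Set.inter s (PySem.Set.ofList m.toList))
      (PySem.Set.ofList (group.headD "").toList)
    total + (((group.headD "").toList.filter (fun c => common.contains c)).length : Int)) 0

-- ===== PRECONDITION & SPEC =====
-- Pre_ excludes files containing an empty group: there both A and B raise IndexError at group[0].
def Pre_sum_of_common_counts (file : List (List String)) : Prop := ∀ g ∈ file, g ≠ []
instance (file : List (List String)) : Decidable (Pre_sum_of_common_counts file) := by
  unfold Pre_sum_of_common_counts; infer_instance
def pvWitness_sum_of_common_counts : List (List String) := [["ab c", "b"], ["xy"]]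

def Spec_sum_of_common_counts (file : List (List String)) (out : Int) : Prop := out = sum_of_common_counts_alt file
instance (file : List (List String)) (out : Int) : Decidable (Spec_sum_of_common_counts file out) := by unfold Spec_sum_of_common_counts; infer_instance

-- ===== CLAIM (what is proved, stated in full; the proofs are below) =====
def Claim_equal_sum_of_common_counts : Prop := ∀ (file : List (List String)), Dom_sum_of_common_counts file → Pre_sum_of_common_counts file → Spec_sum_of_common_counts file (sum_of_common_counts file)

-- ===== LEMMAS AND PROOFS =====

-- a char "passes" iff every member of the group contains it
def pvPass (group : List String) (c : Char) : Bool := group.all (fun m => m.toList.contains c)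

theorem pvLoopA_filter (group : List String) :
    ∀ (n : Nat) (answers : List Char) (i : Nat), answers.length - i ≤ n →
      (∀ c ∈ answers.take i, pvPass group c = true) →
      pvLoopA group answers i = answers.filter (pvPass group) := by
  intro n
  induction n with
  | zero =>
    intro answers i hlen hpre
    have hge : ¬ i < answers.length := by omega
    rw [pvLoopA, dif_neg hge]
    rw [List.take_of_length_le (by omega)] at hpre
    exact (List.filter_eq_self.mpr hpre).symm
  | succ n ih =>
    intro answers i hlen hpre
    by_cases h : i < answers.length
    · rw [pvLoopA, dif_pos h]
      obtain ⟨c, hgc⟩ : ∃ c, answers[i] = c := ⟨_, rfl⟩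
      have hcmem : c ∈ answers := hgc ▸ List.getElem_mem h
      simp only [hgc]
      by_cases hany : (group.any (fun m => !(m.toList.contains c))) = true
      · rw [if_pos hany]
        have hpassc : pvPass group c = false := by
          rw [List.any_eq_true] at hany
          obtain ⟨m, hm, hmc⟩ := hany
          rw [Bool.eq_false_iff]
          intro hall
          rw [pvPass, List.all_eq_true] at hall
          rw [hall m hm] at hmc
          simp at hmc
        have hcnotpre : c ∉ answers.take i := by
          intro hmem
          rw [hpre _ hmem] at hpassc
          simp at hpassc
        have hdrop : answers.drop i = c :: answers.drop (i + 1) := by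
          rw [List.drop_eq_getElem_cons h, hgc]
        have herase : answers.erase c = answers.take i ++ answers.drop (i + 1) := by
          conv_lhs => rw [← List.take_append_drop i answers]
          rw [List.erase_append_right _ hcnotpre, hdrop, List.erase_cons_head]
        rw [PySem.List.remove?_eq_some_erase _ _ hcmem, Option.getD_some, herase]
        have hlt : (answers.take i).length = i := by rw [List.length_take]; omega
        have htakeL : (answers.take i ++ answers.drop (i + 1)).take i = answers.take i := by
          exact List.take_left' hlt
        rw [ih (answers.take i ++ answers.drop (i + 1)) i
              (by rw [List.length_append, hlt, List.length_drop]; omega)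
              (by rw [htakeL]; exact hpre)]
        conv_rhs => rw [← List.take_append_drop i answers, hdrop]
        rw [List.filter_append, List.filter_append, List.filter_cons_of_neg (by simp [hpassc])]
      · rw [if_neg hany]
        have hpassc : pvPass group c = true := by
          rw [pvPass, List.all_eq_true]
          intro m hm
          by_contra hmc
          exact hany (List.any_eq_true.mpr ⟨m, hm, by
            rw [Bool.eq_false_iff.mpr hmc]; rfl⟩)
        refine ih answers (i + 1) (by omega) ?_
        intro c' hc
        rw [List.take_add_one, List.getElem?_eq_getElem h, hgc] at hc
        rcases List.mem_append.mp hc with hc | hc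
        · exact hpre _ hc
        · simp only [Option.toList_some, List.mem_singleton] at hc
          rw [hc]; exact hpassc
    · have hge := h
      rw [pvLoopA, dif_neg hge]
      rw [List.take_of_length_le (by omega)] at hpre
      exact (List.filter_eq_self.mpr hpre).symm

theorem pvCommon_contains (group : List String) (c : Char) :
    ∀ (s : PySem.Set Char),
    (group.foldl (fun s m => PySem.Set.inter s (PySem.Set.ofList m.toList)) s).contains c
      = (s.contains c && group.all (fun m => m.toList.contains c)) := by
  induction group with
  | nil => intro s; simp
  | cons m rest ih =>
    intro s
    rw [List.foldl_cons, ih]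
    have hx : (PySem.Set.inter s (PySem.Set.ofList m.toList)).contains c
        = (s.contains c && m.toList.contains c) := by
      by_cases h1 : c ∈ s <;> by_cases h2 : c ∈ m.toList <;>
        simp [PySem.Set.mem_inter, PySem.Set.mem_ofList, h1, h2]
    rw [hx, List.all_cons, Bool.and_assoc]

theorem pvGroup_eq (x : String) (t : List String) :
    (pvLoopA (x :: t) x.toList 0).length
      = (x.toList.filter (fun c =>
          ((x :: t).foldl (fun s m => PySem.Set.inter s (PySem.Set.ofList m.toList))
            (PySem.Set.ofList x.toList)).contains c)).length := by
  rw [pvLoopA_filter (x :: t) x.toList.length x.toList 0 (by omega) (by simp)]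
  congr 1
  refine (List.filter_congr ?_).symm
  intro c hc
  rw [pvCommon_contains]
  have : (PySem.Set.ofList x.toList).contains c = true := by
    simp [PySem.Set.mem_ofList, hc]
  rw [this, Bool.true_and, pvPass]

theorem pvFold_eq :
    ∀ (file : List (List String)), (∀ g ∈ file, g ≠ []) → ∀ (acc : Int),
    file.foldl (fun ans group =>
        ans + ((pvLoopA group ((PySem.List.pyGet? group 0).getD "").toList 0).length : Int)) acc
      = file.foldl (fun total group =>
          let common := group.foldl
            (fun s m => PySem.Set.inter s (PySem.Set.ofList m.toList))
            (PySem.Set.ofList (group.headD "").toList)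
          total + (((group.headD "").toList.filter (fun c => common.contains c)).length : Int)) acc := by
  intro file
  induction file with
  | nil => intro _ acc; rfl
  | cons g rest ih =>
    intro hpre acc
    obtain ⟨x, t, rfl⟩ : ∃ x t, g = x :: t := by
      cases g with
      | nil => exact absurd rfl (hpre [] (by simp))
      | cons x t => exact ⟨x, t, rfl⟩
    rw [List.foldl_cons, List.foldl_cons]
    have hget : (PySem.List.pyGet? (x :: t) 0).getD "" = x := by
      simp [PySem.List.pyGet?, PySem.List.pyIdx?]
    rw [hget]
    simp only [List.headD_cons]
    rw [pvGroup_eq x t]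
    exact ih (fun g hg => hpre g (by simp [hg])) _

-- ===== VERDICT (by name: the statement is the Claim_ definition above) =====
theorem sum_of_common_counts_spec : Claim_equal_sum_of_common_counts := by
  intro file _ hpre
  unfold Spec_sum_of_common_counts sum_of_common_counts sum_of_common_counts_alt
  exact pvFold_eq file hpre 0
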